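-- pv_equiv track=rewrite | github.com/H-Wol/algorithmStudy | baekjoon/silver/2607_비슷한 단어.py | count_similar_words
-- ===== SOURCE A (Python) =====
-- from collections import Counter
--
-- def count_similar_words(words):
--     first_word = words[0]
--     first_word_freq = Counter(first_word)
--     similar_count = 0
--
--     for word in words[1:]:
--         word_freq = Counter(word)
--
--         if word_freq == first_word_freq:
--             similar_count += 1
--         elif len(word) > len(first_word):
--             diff_count = sum((word_freq - first_word_freq).values())
--             if diff_count <= 1:
--                 similar_count += 1
--         else:
--             diff_count = sum((first_word_freq - word_freq).values())
--             if diff_count <= 1: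
--                 similar_count += 1
--
--     return similar_count
-- ===== SOURCE B (Python) =====
-- def count_similar_words(words):
--     s0 = sorted(words[0])
--     total = 0
--     for w in words[1:]:
--         s = sorted(w)
--         i = j = n = p = 0
--         while i < len(s0) and j < len(s):
--             if s0[i] == s[j]:
--                 i += 1
--                 j += 1
--             elif s0[i] < s[j]:
--                 n += 1
--                 i += 1
--             else:
--                 p += 1
--                 j += 1
--         n += len(s0) - i
--         p += len(s) - j
--         if max(n, p) <= 1:
--             total += 1
--     return total
-- ===== Notes on version B (the rewrite author's own statement) =====
-- stated objective: alternative
-- what changed: Replaces the Counter-equality check plus three length-dependent positive-difference branches by sorting each word's characters once and running a two-pointer merge over the two sorted lists, counting unmatched letters on each side (n, p) and declaring similarity by the single condition max(n, p) <= 1.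
import Mathlib
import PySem

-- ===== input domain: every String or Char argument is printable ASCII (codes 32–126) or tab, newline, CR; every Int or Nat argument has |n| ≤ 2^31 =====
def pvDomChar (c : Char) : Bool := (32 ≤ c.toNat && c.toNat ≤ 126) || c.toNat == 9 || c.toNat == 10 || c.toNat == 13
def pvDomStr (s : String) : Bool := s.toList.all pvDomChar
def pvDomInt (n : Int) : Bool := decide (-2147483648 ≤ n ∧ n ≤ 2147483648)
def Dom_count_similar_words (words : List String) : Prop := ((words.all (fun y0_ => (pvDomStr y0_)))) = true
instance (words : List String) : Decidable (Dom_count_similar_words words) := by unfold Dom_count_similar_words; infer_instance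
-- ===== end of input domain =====

-- B replaces Counter equality plus three length-based difference branches by a two-pointer
-- merge over the two sorted character lists and the single test max(n, p) ≤ 1 (objective: alternative).

-- ===== PORT A =====
-- Python dict/Counter `==`: same size and every item of the one found in the other (order-insensitive)
def pvDictEq (d1 d2 : PySem.Dict Char Int) : Bool :=
  d1.size == d2.size && d1.items.all (fun kv => d2.get? kv.1 == some kv.2)

-- sum((d1 - d2).values()) for Counters: sum of the positive count differences over d1's items
def pvCounterDiffSum (d1 d2 : PySem.Dict Char Int) : Int :=
  d1.items.foldl (fun s kv =>
    let n := kv.2 - d2.getD kv.1 0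
    if n > 0 then s + n else s) 0

def count_similar_words (words : List String) : Int :=
  match words with
  | [] => 0  -- words[0] raises IndexError here; excluded by Pre_
  | first :: rest =>
    let firstFreq := PySem.Dict.counter first.toList
    rest.foldl (fun acc w =>
      let wordFreq := PySem.Dict.counter w.toList
      if pvDictEq wordFreq firstFreq then acc + 1
      else if w.toList.length > first.toList.length then
        if pvCounterDiffSum wordFreq firstFreq ≤ 1 then acc + 1 else acc
      else
        if pvCounterDiffSum firstFreq wordFreq ≤ 1 then acc + 1 else acc) 0

-- ===== PORT B =====
-- the two-pointer while loop of Source B: n = letters of the left list unmatched, p = of the right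
def pvMergeNP : List Char → List Char → Nat × Nat
  | [], ys => (0, ys.length)
  | _ :: xs, [] => (xs.length + 1, 0)
  | x :: xs, y :: ys =>
    if x = y then pvMergeNP xs ys
    else if x < y then
      let r := pvMergeNP xs (y :: ys); (r.1 + 1, r.2)
    else
      let r := pvMergeNP (x :: xs) ys; (r.1, r.2 + 1)
termination_by la lb => la.length + lb.length

def count_similar_words_alt (words : List String) : Int :=
  match words with
  | [] => 0  -- sorted(words[0]) raises IndexError here; excluded by Pre_
  | first :: rest =>
    let s0 := PySem.List.sorted first.toList id false
    rest.foldl (fun acc w =>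
      let s := PySem.List.sorted w.toList id false
      let r := pvMergeNP s0 s
      if max r.1 r.2 ≤ 1 then acc + 1 else acc) 0

-- ===== PRECONDITION & SPEC =====
-- Pre_ excludes only the empty list, on which A (words[0]) raises IndexError.
def Pre_count_similar_words (words : List String) : Prop := words ≠ []
instance (words : List String) : Decidable (Pre_count_similar_words words) := by
  unfold Pre_count_similar_words; infer_instance

def pvWitness_count_similar_words : List String := (["acds", "dsca", "ads", "qacds", "zz"])

def Spec_count_similar_words (words : List String) (out : Int) : Prop := out = count_similar_words_alt words
instance (words : List String) (out : Int) : Decidable (Spec_count_similar_words words out) := by unfold Spec_count_similar_words; infer_instance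

-- ===== CLAIM (what is proved, stated in full; the proofs are below) =====
def Claim_equal_count_similar_words : Prop := ∀ (words : List String), Dom_count_similar_words words → Pre_count_similar_words words → Spec_count_similar_words words (count_similar_words words)

-- ===== LEMMAS AND PROOFS =====

theorem pv_find?_map_of_mem {g : Char → Int} {l : List Char} (hnd : l.Nodup) {k : Char}
    (hk : k ∈ l) :
    (l.map (fun a => (a, g a))).find? (fun p => p.1 == k) = some (k, g k) := by
  induction l with
  | nil => cases hk
  | cons a t ih =>
    simp only [List.map_cons, List.find?_cons]
    by_cases hak : a = k
    · subst hak; simp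
    · cases hk with
      | head => exact absurd rfl hak
      | tail _ h =>
        have hb : (a == k) = false := by simp [hak]
        simp only [hb]
        exact ih hnd.of_cons h

theorem pv_find?_map_of_not_mem {g : Char → Int} {l : List Char} {k : Char}
    (hk : k ∉ l) :
    (l.map (fun a => (a, g a))).find? (fun p => p.1 == k) = none := by
  induction l with
  | nil => rfl
  | cons a t ih =>
    simp only [List.map_cons, List.find?_cons]
    have : (a == k) = false := by simp; rintro rfl; exact hk (by simp)
    simp only [this]
    exact ih (fun h => hk (by simp [h]))

theorem pv_get?_counter (f : List Char) (k : Char) :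
    (PySem.Dict.counter f).get? k = if k ∈ f then some ((List.count k f : Int)) else none := by
  have hnd := PySem.Set.nodup_ofList f
  by_cases hk : k ∈ f
  · have hm : k ∈ PySem.Set.ofList f := (PySem.Set.mem_ofList f k).mpr hk
    rw [if_pos hk]
    simp only [PySem.Dict.get?, PySem.Dict.items_counter]
    rw [pv_find?_map_of_mem hnd hm]
    rfl
  · have hm : k ∉ PySem.Set.ofList f := fun h => hk ((PySem.Set.mem_ofList f k).mp h)
    rw [if_neg hk]
    simp only [PySem.Dict.get?, PySem.Dict.items_counter]
    rw [pv_find?_map_of_not_mem hm]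
    rfl

theorem pv_ofList_toFinset (l : List Char) : (PySem.Set.ofList l).toFinset = l.toFinset := by
  ext a
  simp [List.mem_toFinset, PySem.Set.mem_ofList]

theorem pv_ofList_length (l : List Char) : (PySem.Set.ofList l).length = l.toFinset.card := by
  rw [← pv_ofList_toFinset, List.toFinset_card_of_nodup (PySem.Set.nodup_ofList l)]

-- Python's Counter equality is multiset equality of the underlying character lists
theorem pv_dictEq_iff (w f : List Char) :
    pvDictEq (PySem.Dict.counter w) (PySem.Dict.counter f) = true ↔ (↑w : Multiset Char) = ↑f := by
  constructor
  · intro h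
    unfold pvDictEq at h
    rw [Bool.and_eq_true] at h
    obtain ⟨hlen, hall⟩ := h
    rw [beq_iff_eq] at hlen
    simp only [PySem.Dict.size, PySem.Dict.items_counter, List.length_map] at hlen
    rw [List.all_eq_true] at hall
    have key : ∀ c ∈ w, c ∈ f ∧ List.count c f = List.count c w := by
      intro c hc
      have hmem : (c, (List.count c w : Int)) ∈ (PySem.Dict.counter w).items := by
        rw [PySem.Dict.items_counter]
        exact List.mem_map.mpr ⟨c, (PySem.Set.mem_ofList w c).mpr hc, rfl⟩
      have h2 := hall _ hmem
      rw [beq_iff_eq, pv_get?_counter] at h2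
      by_cases hcf : c ∈ f
      · refine ⟨hcf, ?_⟩
        rw [if_pos hcf] at h2
        have h3 : (List.count c f : Int) = (List.count c w : Int) := Option.some.inj h2
        exact_mod_cast h3
      · rw [if_neg hcf] at h2; cases h2
    have hsub : w.toFinset ⊆ f.toFinset := by
      intro c hc
      exact List.mem_toFinset.mpr (key c (List.mem_toFinset.mp hc)).1
    have hset : w.toFinset = f.toFinset := by
      apply Finset.eq_of_subset_of_card_le hsub
      rw [← pv_ofList_length, ← pv_ofList_length, hlen]
    refine Multiset.ext.mpr ?_
    intro c
    simp only [Multiset.coe_count]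
    by_cases hc : c ∈ w
    · exact ((key c hc).2).symm
    · have hcf : c ∉ f := fun hf => hc (List.mem_toFinset.mp (hset ▸ List.mem_toFinset.mpr hf))
      rw [List.count_eq_zero_of_not_mem hc, List.count_eq_zero_of_not_mem hcf]
  · intro h
    have hcount : ∀ c, List.count c w = List.count c f := by
      intro c
      have := Multiset.ext.mp h c
      simpa [Multiset.coe_count] using this
    have hmemiff : ∀ c, c ∈ w ↔ c ∈ f := by
      intro c
      rw [← List.count_pos_iff, ← List.count_pos_iff, hcount c]
    unfold pvDictEq
    rw [Bool.and_eq_true]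
    constructor
    · rw [beq_iff_eq]
      simp only [PySem.Dict.size, PySem.Dict.items_counter, List.length_map]
      rw [pv_ofList_length, pv_ofList_length]
      congr 1
      ext a
      simp only [List.mem_toFinset]
      exact hmemiff a
    · rw [List.all_eq_true]
      intro kv hkv
      rw [PySem.Dict.items_counter] at hkv
      obtain ⟨c, hc, rfl⟩ := List.mem_map.mp hkv
      rw [beq_iff_eq, pv_get?_counter,
          if_pos ((hmemiff c).mp ((PySem.Set.mem_ofList w c).mp hc)), hcount c]

theorem pv_foldl_if_sum (l : List (Char × Int)) (d2 : PySem.Dict Char Int) (s : Int) :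
    l.foldl (fun s kv => let n := kv.2 - d2.getD kv.1 0; if n > 0 then s + n else s) s
      = s + (l.map (fun kv => if kv.2 - d2.getD kv.1 0 > 0 then kv.2 - d2.getD kv.1 0 else 0)).sum := by
  induction l generalizing s with
  | nil => simp
  | cons kv t ih =>
    simp only [List.foldl_cons, List.map_cons, List.sum_cons, ih]
    split <;> omega

theorem pv_card_sub_eq_sum (w f : List Char) :
    ((↑w : Multiset Char) - ↑f).card = ∑ a ∈ w.toFinset, (List.count a w - List.count a f) := by
  have hsub : ((↑w : Multiset Char) - ↑f).toFinset ⊆ w.toFinset := by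
    intro a ha
    rw [Multiset.mem_toFinset] at ha
    have hle := Multiset.count_le_of_le a (Multiset.sub_le_self (↑w) (↑f : Multiset Char))
    rw [← Multiset.count_pos] at ha
    rw [List.mem_toFinset, ← List.count_pos_iff, ← Multiset.coe_count]
    omega
  have hzero : ∀ a ∈ w.toFinset, a ∉ ((↑w : Multiset Char) - ↑f).toFinset →
      Multiset.count a ((↑w : Multiset Char) - ↑f) = 0 := by
    intro a _ ha
    rw [Multiset.mem_toFinset] at ha
    exact Multiset.count_eq_zero_of_notMem ha
  calc ((↑w : Multiset Char) - ↑f).card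
      = ∑ a ∈ ((↑w : Multiset Char) - ↑f).toFinset, Multiset.count a ((↑w : Multiset Char) - ↑f) :=
        (Multiset.toFinset_sum_count_eq _).symm
    _ = ∑ a ∈ w.toFinset, Multiset.count a ((↑w : Multiset Char) - ↑f) :=
        Finset.sum_subset hsub hzero
    _ = ∑ a ∈ w.toFinset, (List.count a w - List.count a f) := by
        apply Finset.sum_congr rfl
        intro a _
        rw [Multiset.count_sub, Multiset.coe_count, Multiset.coe_count]

-- A's sum((c1 - c2).values()) is the size of the multiset difference
theorem pv_diffSum_eq (w f : List Char) :
    pvCounterDiffSum (PySem.Dict.counter w) (PySem.Dict.counter f)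
      = (((↑w : Multiset Char) - ↑f).card : Int) := by
  unfold pvCounterDiffSum
  rw [pv_foldl_if_sum, zero_add, PySem.Dict.items_counter, List.map_map]
  have hfun : ((fun kv : Char × Int => if kv.2 - (PySem.Dict.counter f).getD kv.1 0 > 0 then kv.2 - (PySem.Dict.counter f).getD kv.1 0 else 0)
        ∘ fun k => (k, (List.count k w : Int)))
      = fun c => ((List.count c w - List.count c f : Nat) : Int) := by
    funext c
    simp only [Function.comp, PySem.Dict.getD_counter]
    split <;> omega
  rw [hfun, pv_card_sub_eq_sum]
  rw [show (fun c => ((List.count c w - List.count c f : Nat) : Int))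
        = (Nat.cast ∘ fun c => (List.count c w - List.count c f)) from rfl]
  rw [← List.map_map, ← Nat.cast_list_sum]
  congr 1
  rw [← List.sum_toFinset _ (PySem.Set.nodup_ofList w), pv_ofList_toFinset]

theorem pv_cons_sub_of_not_mem (a : Char) (s t : Multiset Char) (h : a ∉ t) :
    (a ::ₘ s) - t = a ::ₘ (s - t) := by
  ext c
  simp only [Multiset.count_sub, Multiset.count_cons]
  by_cases hca : c = a
  · subst hca
    rw [Multiset.count_eq_zero_of_notMem h]
    omega
  · simp [hca]

-- B's merge loop computes the sizes of the two multiset differences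
theorem pv_mergeNP_spec (la lb : List Char) :
    la.Pairwise (· ≤ ·) → lb.Pairwise (· ≤ ·) →
    pvMergeNP la lb = (((↑la : Multiset Char) - ↑lb).card, ((↑lb : Multiset Char) - ↑la).card) := by
  induction la, lb using pvMergeNP.induct with
  | case1 ys =>
    intro _ _
    simp [pvMergeNP, Multiset.coe_card]
  | case2 x xs =>
    intro _ _
    simp [pvMergeNP, Multiset.coe_card]
  | case3 xs y ys ih =>
    intro ha hb
    rw [pvMergeNP, if_pos rfl, ih ha.of_cons hb.of_cons]
    rw [← Multiset.cons_coe, ← Multiset.cons_coe, Multiset.sub_cons, Multiset.sub_cons,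
        Multiset.erase_cons_head, Multiset.erase_cons_head]
  | case4 x xs y ys hne hlt ih =>
    intro ha hb
    have hxm : x ∉ (y :: ys) := by
      intro hx
      cases hx with
      | head => exact hne rfl
      | tail _ hx => exact absurd (List.rel_of_pairwise_cons hb hx) (by exact fun hyx => absurd (lt_of_lt_of_le hlt hyx) (lt_irrefl x))
    rw [pvMergeNP, if_neg hne, if_pos hlt, ih ha.of_cons hb]
    have h1 : ((↑(x :: xs) : Multiset Char) - ↑(y :: ys)) = x ::ₘ ((↑xs : Multiset Char) - ↑(y :: ys)) := by
      rw [← Multiset.cons_coe]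
      exact pv_cons_sub_of_not_mem x _ _ (by simpa using hxm)
    have h2 : ((↑(y :: ys) : Multiset Char) - ↑(x :: xs)) = (↑(y :: ys) : Multiset Char) - ↑xs := by
      rw [← Multiset.cons_coe (a := x), Multiset.sub_cons, Multiset.erase_of_notMem (by simpa using hxm)]
    rw [h1, h2, Multiset.card_cons]
  | case5 x xs y ys hne hnlt ih =>
    intro ha hb
    have hylt : y < x := by
      rcases lt_trichotomy x y with h | h | h
      · exact absurd h hnlt
      · exact absurd h hne
      · exact h
    have hym : y ∉ (x :: xs) := by
      intro hy
      cases hy with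
      | head => exact hne rfl
      | tail _ hy => exact absurd (List.rel_of_pairwise_cons ha hy) (by exact fun hxy => absurd (lt_of_lt_of_le hylt hxy) (lt_irrefl y))
    rw [pvMergeNP, if_neg hne, if_neg hnlt, ih ha hb.of_cons]
    have h1 : ((↑(y :: ys) : Multiset Char) - ↑(x :: xs)) = y ::ₘ ((↑ys : Multiset Char) - ↑(x :: xs)) := by
      rw [← Multiset.cons_coe]
      exact pv_cons_sub_of_not_mem y _ _ (by simpa using hym)
    have h2 : ((↑(x :: xs) : Multiset Char) - ↑(y :: ys)) = (↑(x :: xs) : Multiset Char) - ↑ys := by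
      rw [← Multiset.cons_coe (a := y), Multiset.sub_cons, Multiset.erase_of_notMem (by simpa using hym)]
    rw [h1, h2, Multiset.card_cons]

theorem pv_card_identity (F W : Multiset Char) :
    (F - W).card + W.card = (W - F).card + F.card := by
  have h1 := congrArg Multiset.card (Multiset.sub_add_inter F W)
  have h2 := congrArg Multiset.card (Multiset.sub_add_inter W F)
  rw [Multiset.card_add] at h1 h2
  rw [Multiset.inter_comm] at h2
  omega

-- the per-word decisions of A and B agree
theorem pv_step_eq (first w : String) (acc : Int) :
    (if pvDictEq (PySem.Dict.counter w.toList) (PySem.Dict.counter first.toList) then acc + 1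
     else if w.toList.length > first.toList.length then
       if pvCounterDiffSum (PySem.Dict.counter w.toList) (PySem.Dict.counter first.toList) ≤ 1 then acc + 1 else acc
     else if pvCounterDiffSum (PySem.Dict.counter first.toList) (PySem.Dict.counter w.toList) ≤ 1 then acc + 1 else acc)
    = (if max (pvMergeNP (PySem.List.sorted first.toList id false) (PySem.List.sorted w.toList id false)).1
             (pvMergeNP (PySem.List.sorted first.toList id false) (PySem.List.sorted w.toList id false)).2 ≤ 1
       then acc + 1 else acc) := by
  have hperm0 : (↑(PySem.List.sorted first.toList id false) : Multiset Char) = ↑first.toList :=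
    Multiset.coe_eq_coe.mpr (PySem.List.sorted_perm first.toList id false)
  have hperm1 : (↑(PySem.List.sorted w.toList id false) : Multiset Char) = ↑w.toList :=
    Multiset.coe_eq_coe.mpr (PySem.List.sorted_perm w.toList id false)
  have hpw0 : (PySem.List.sorted first.toList id false).Pairwise (· ≤ ·) := by
    simpa using PySem.List.sorted_pairwise first.toList id
  have hpw1 : (PySem.List.sorted w.toList id false).Pairwise (· ≤ ·) := by
    simpa using PySem.List.sorted_pairwise w.toList id
  have hm := pv_mergeNP_spec _ _ hpw0 hpw1
  rw [hperm0, hperm1] at hm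
  have hid := pv_card_identity (↑first.toList) (↑w.toList)
  rw [Multiset.coe_card, Multiset.coe_card] at hid
  rw [hm, pv_diffSum_eq, pv_diffSum_eq]
  by_cases heq : pvDictEq (PySem.Dict.counter w.toList) (PySem.Dict.counter first.toList) = true
  · rw [if_pos heq]
    have hWF := (pv_dictEq_iff w.toList first.toList).mp heq
    have hn0 : ((↑first.toList : Multiset Char) - ↑w.toList).card = 0 := by
      rw [hWF, tsub_self, Multiset.card_zero]
    have hp0 : ((↑w.toList : Multiset Char) - ↑first.toList).card = 0 := by
      rw [hWF, tsub_self, Multiset.card_zero]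
    have hcond : max (((↑first.toList : Multiset Char) - ↑w.toList).card,
        ((↑w.toList : Multiset Char) - ↑first.toList).card).1
        (((↑first.toList : Multiset Char) - ↑w.toList).card,
        ((↑w.toList : Multiset Char) - ↑first.toList).card).2 ≤ 1 := by
      simp only [Nat.max_le]
      omega
    rw [if_pos hcond]
  · rw [if_neg heq]
    simp only [Nat.max_le]
    split_ifs <;> omega

-- ===== VERDICT (by name: the statement is the Claim_ definition above) =====
theorem count_similar_words_spec : Claim_equal_count_similar_words := by
  intro words _ hpre
  unfold Spec_count_similar_words
  match words with
  | [] => exact absurd rfl hpre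
  | first :: rest =>
    show (rest.foldl (fun acc w =>
        if pvDictEq (PySem.Dict.counter w.toList) (PySem.Dict.counter first.toList) then acc + 1
        else if w.toList.length > first.toList.length then
          if pvCounterDiffSum (PySem.Dict.counter w.toList) (PySem.Dict.counter first.toList) ≤ 1 then acc + 1 else acc
        else if pvCounterDiffSum (PySem.Dict.counter first.toList) (PySem.Dict.counter w.toList) ≤ 1 then acc + 1 else acc) 0)
      = (rest.foldl (fun acc w =>
        if max (pvMergeNP (PySem.List.sorted first.toList id false) (PySem.List.sorted w.toList id false)).1
               (pvMergeNP (PySem.List.sorted first.toList id false) (PySem.List.sorted w.toList id false)).2 ≤ 1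
        then acc + 1 else acc) 0)
    congr 1
    funext acc w
    exact pv_step_eq first w acc
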